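-- pv_equiv track=rewrite | github.com/durianh96/InvNet-simulation | graph_algorithms.py | cal_lt_of_node
-- ===== SOURCE A (Python) =====
-- def find_preds_of_node(edges: list):
--     """
--     Find the predecessors of each node in a directed graph.
--     Args:
--         edges:
--
--     Returns:
--
--     """
--     nodes = set([node for tu in edges for node in tu])
--     preds_of_node = {node: set() for node in nodes}
--     for pred, succ in edges:
--         preds_of_node[succ].add(pred)
--     return preds_of_node
--
-- def cal_lt_of_node(edges: list, process_lt_of_node: dict, lt_of_edge: dict):
--     nodes = set([node for tu in edges for node in tu])
--     preds_of_node = find_preds_of_node(edges)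
--     lt_of_node = {node: process_lt for node, process_lt in process_lt_of_node.items()}
--     for node in nodes:
--         if len(preds_of_node[node]) > 0:
--             lt_of_node[node] += max([lt_of_edge[(pred, node)] for pred in preds_of_node[node]])
--     return lt_of_node
-- ===== SOURCE B (Python) =====
-- def cal_lt_of_node(edges: list, process_lt_of_node: dict, lt_of_edge: dict):
--     max_in_lt = {}
--     for pred, succ in edges:
--         w = lt_of_edge[(pred, succ)]
--         if succ in max_in_lt:
--             if w > max_in_lt[succ]:
--                 max_in_lt[succ] = w
--         else:
--             max_in_lt[succ] = w
--     lt_of_node = dict(process_lt_of_node)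
--     for node, m in max_in_lt.items():
--         lt_of_node[node] += m
--     return lt_of_node
-- ===== Notes on version B (the rewrite author's own statement) =====
-- stated objective: simpler
-- what changed: Replaces the node-set/predecessor-set construction and the per-node max-over-list rescan with a single pass over edges that keeps a running per-successor maximum in one dict, then adds it into a copy of process_lt_of_node.
-- outside the precondition, e.g. on cal_lt_of_node([(1, 2)], {1: 0}, {(1, 2): 5}): A raises KeyError, B raises KeyError; on cal_lt_of_node([(1, 2)], {1: 0, 2: 1}, {}): A raises KeyError, B raises KeyError
import Mathlib
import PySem

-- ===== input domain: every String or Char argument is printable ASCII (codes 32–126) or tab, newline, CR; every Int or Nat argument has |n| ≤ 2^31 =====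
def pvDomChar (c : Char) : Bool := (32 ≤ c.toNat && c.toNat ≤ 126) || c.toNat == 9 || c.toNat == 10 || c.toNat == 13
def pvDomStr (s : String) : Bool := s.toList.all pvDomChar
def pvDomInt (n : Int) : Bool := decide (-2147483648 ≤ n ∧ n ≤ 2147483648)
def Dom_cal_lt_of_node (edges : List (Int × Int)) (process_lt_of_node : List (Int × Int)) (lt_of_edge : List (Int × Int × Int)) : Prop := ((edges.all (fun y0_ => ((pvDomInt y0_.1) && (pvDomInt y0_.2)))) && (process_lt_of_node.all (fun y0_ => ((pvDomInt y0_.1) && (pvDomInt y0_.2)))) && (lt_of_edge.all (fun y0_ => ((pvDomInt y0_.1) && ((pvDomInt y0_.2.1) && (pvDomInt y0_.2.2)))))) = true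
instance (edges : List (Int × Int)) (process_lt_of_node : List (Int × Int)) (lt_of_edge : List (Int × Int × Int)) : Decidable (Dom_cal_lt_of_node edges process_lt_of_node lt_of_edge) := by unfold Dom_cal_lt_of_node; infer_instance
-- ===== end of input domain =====

-- B replaces A's node-set/predecessor-set construction and per-node max-over-list rescan by one pass
-- over edges keeping a running per-successor maximum in a dict (objective: simpler).

-- Input decoding shared by both ports: the Python dict arguments arrive as association lists;
-- Python builds the dict from them (last value wins, first insertion position) — PySem.Dict.ofList.
def pvEdict (lt_of_edge : List (Int × Int × Int)) : PySem.Dict (Int × Int) Int :=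
  PySem.Dict.ofList (lt_of_edge.map (fun t => ((t.1, t.2.1), t.2.2)))

-- ===== PORT A =====
def find_preds_of_node (edges : List (Int × Int)) : PySem.Dict Int (PySem.Set Int) :=
  let nodes : PySem.Set Int := PySem.Set.ofList (edges.flatMap (fun tu => [tu.1, tu.2]))
  let preds0 : PySem.Dict Int (PySem.Set Int) :=
    nodes.foldl (fun d node => d.insert node ([] : PySem.Set Int)) PySem.Dict.empty
  -- preds_of_node[succ].add(pred): succ is always a key of preds0, so modify with default ∅ is exact
  edges.foldl (fun d e => d.modify e.2 ([] : PySem.Set Int) (fun s => PySem.Set.add s e.1)) preds0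

def cal_lt_of_node (edges : List (Int × Int)) (process_lt_of_node : List (Int × Int)) (lt_of_edge : List (Int × Int × Int)) : List (Int × Int) :=
  let nodes : PySem.Set Int := PySem.Set.ofList (edges.flatMap (fun tu => [tu.1, tu.2]))
  let preds_of_node := find_preds_of_node edges
  let lt_of_node : PySem.Dict Int Int := PySem.Dict.ofList process_lt_of_node
  -- lt_of_edge[(pred,node)] raises KeyError when absent and lt_of_node[node] += … raises KeyError when
  -- node is not a key: Pre_ excludes both, so getD 0 / modify-with-default are exact inside Pre_;
  -- the max of a nonempty list is PySem.List.max? (guard `if len > 0` makes the none branch dead code)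
  (nodes.foldl (fun d node =>
      let ps := preds_of_node.getD node ([] : PySem.Set Int)
      if ps.length > 0 then
        match PySem.List.max? (ps.map (fun pred => (pvEdict lt_of_edge).getD (pred, node) 0)) (fun y => y) with
        | some m => d.modify node 0 (fun v => v + m)
        | none => d
      else d) lt_of_node).items

-- ===== PORT B =====
def cal_lt_of_node_alt (edges : List (Int × Int)) (process_lt_of_node : List (Int × Int)) (lt_of_edge : List (Int × Int × Int)) : List (Int × Int) :=
  let max_in_lt : PySem.Dict Int Int := edges.foldl (fun d e =>
      let w := (pvEdict lt_of_edge).getD (e.1, e.2) 0   -- KeyError when absent: excluded by Pre_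
      match d.get? e.2 with
      | some m => if w > m then d.insert e.2 w else d
      | none => d.insert e.2 w) PySem.Dict.empty
  let lt_of_node : PySem.Dict Int Int := PySem.Dict.ofList process_lt_of_node
  -- lt_of_node[node] += m raises KeyError when node absent: excluded by Pre_
  (max_in_lt.items.foldl (fun d p => d.modify p.1 0 (fun v => v + p.2)) lt_of_node).items

-- ===== PRECONDITION & SPEC =====
-- Pre_ excludes exactly the inputs where Python A raises KeyError: an edge whose successor is not a
-- key of process_lt_of_node, or an edge that is not a key of lt_of_edge (B raises there too).
def Pre_cal_lt_of_node (edges : List (Int × Int)) (process_lt_of_node : List (Int × Int)) (lt_of_edge : List (Int × Int × Int)) : Prop :=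
  (edges.all (fun e => process_lt_of_node.any (fun q => q.1 == e.2)
      && lt_of_edge.any (fun t => t.1 == e.1 && t.2.1 == e.2))) = true
instance (edges : List (Int × Int)) (process_lt_of_node : List (Int × Int)) (lt_of_edge : List (Int × Int × Int)) : Decidable (Pre_cal_lt_of_node edges process_lt_of_node lt_of_edge) := by unfold Pre_cal_lt_of_node; infer_instance
def pvWitness_cal_lt_of_node : (List (Int × Int)) × (List (Int × Int)) × (List (Int × Int × Int)) :=
  ([(1, 2), (3, 2)], [(1, 0), (2, 3), (3, 1)], [(1, (2, 5)), (3, (2, 7))])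

def Spec_cal_lt_of_node (edges : List (Int × Int)) (process_lt_of_node : List (Int × Int)) (lt_of_edge : List (Int × Int × Int)) (out : List (Int × Int)) : Prop := out = cal_lt_of_node_alt edges process_lt_of_node lt_of_edge
instance (edges : List (Int × Int)) (process_lt_of_node : List (Int × Int)) (lt_of_edge : List (Int × Int × Int)) (out : List (Int × Int)) : Decidable (Spec_cal_lt_of_node edges process_lt_of_node lt_of_edge out) := by unfold Spec_cal_lt_of_node; infer_instance

-- ===== CLAIM (what is proved, stated in full; the proofs are below) =====
def Claim_equal_cal_lt_of_node : Prop := ∀ (edges : List (Int × Int)) (process_lt_of_node : List (Int × Int)) (lt_of_edge : List (Int × Int × Int)), Dom_cal_lt_of_node edges process_lt_of_node lt_of_edge → Pre_cal_lt_of_node edges process_lt_of_node lt_of_edge → Spec_cal_lt_of_node edges process_lt_of_node lt_of_edge (cal_lt_of_node edges process_lt_of_node lt_of_edge)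

-- ===== LEMMAS AND PROOFS =====

-- the list of predecessors of n, in edge order, with multiplicity
def pvPredList (edges : List (Int × Int)) (n : Int) : List Int :=
  (edges.filter (fun e => e.2 == n)).map (·.1)

-- the weights flowing into n, in edge order
def pvW (edges : List (Int × Int)) (lt_of_edge : List (Int × Int × Int)) (n : Int) : List Int :=
  (pvPredList edges n).map (fun p => (pvEdict lt_of_edge).getD (p, n) 0)

-- the amount added to node n by either program (none = nothing added)
def pvBest (edges : List (Int × Int)) (lt_of_edge : List (Int × Int × Int)) (n : Int) : Option Int :=
  PySem.List.max? (pvW edges lt_of_edge n) (fun y => y)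

def pvNodes (edges : List (Int × Int)) : PySem.Set Int :=
  PySem.Set.ofList (edges.flatMap (fun tu => [tu.1, tu.2]))

-- A's loop, reified as a list of (node, addend) pairs
def pvLA (edges : List (Int × Int)) (lt_of_edge : List (Int × Int × Int)) : List (Int × Int) :=
  ((pvNodes edges).filter (fun n => (pvBest edges lt_of_edge n).isSome)).map
    (fun n => (n, (pvBest edges lt_of_edge n).getD 0))

-- B's first pass, named
def pvMaxd (edges : List (Int × Int)) (lt_of_edge : List (Int × Int × Int)) : PySem.Dict Int Int :=
  edges.foldl (fun d e =>
      let w := (pvEdict lt_of_edge).getD (e.1, e.2) 0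
      match d.get? e.2 with
      | some m => if w > m then d.insert e.2 w else d
      | none => d.insert e.2 w) PySem.Dict.empty

-- preds0 lookup is always ∅
theorem pv_getD_insert_empty (L : List Int) (d : PySem.Dict Int (PySem.Set Int))
    (h : ∀ k, d.getD k ([] : PySem.Set Int) = []) (k : Int) :
    (L.foldl (fun d n => d.insert n ([] : PySem.Set Int)) d).getD k [] = [] := by
  induction L generalizing d with
  | nil => exact h k
  | cons x t ih =>
      simp only [List.foldl_cons]
      exact ih _ (fun k => by rw [PySem.Dict.getD_insert]; split <;> simp [h])

-- predecessor-set fold spec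
theorem pv_preds_spec (es : List (Int × Int)) (d : PySem.Dict Int (PySem.Set Int)) (n : Int) :
    ((es.foldl (fun d e => d.modify e.2 ([] : PySem.Set Int) (fun s => PySem.Set.add s e.1)) d).getD n []) =
      ((es.filter (fun e => e.2 == n)).map (·.1)).foldl PySem.Set.add (d.getD n []) := by
  induction es generalizing d with
  | nil => simp
  | cons e t ih =>
      simp only [List.foldl_cons, List.filter_cons]
      by_cases hn : e.2 = n
      · simp only [hn, beq_self_eq_true, if_pos, List.map_cons, List.foldl_cons, ih,
          PySem.Dict.getD_modify]
      · have : (e.2 == n) = false := by simp [hn]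
        simp only [this, if_neg, Bool.false_eq_true, not_false_iff, ih, PySem.Dict.getD_modify]
        rw [if_neg (by omega)]

-- B's edge pass, per-successor
theorem pv_maxd_spec (lte : List (Int × Int × Int)) (es : List (Int × Int)) (d : PySem.Dict Int Int) (s : Int) :
    ((es.foldl (fun d e =>
        let w := (pvEdict lte).getD (e.1, e.2) 0
        match d.get? e.2 with
        | some m => if w > m then d.insert e.2 w else d
        | none => d.insert e.2 w) d).get? s) =
      ((es.filter (fun e => e.2 == s)).map (fun e => (pvEdict lte).getD (e.1, e.2) 0)).foldl
        (fun acc w => match acc with | none => some w | some m => if m < w then some w else some m)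
        (d.get? s) := by
  induction es generalizing d with
  | nil => simp
  | cons e t ih =>
      simp only [List.foldl_cons, List.filter_cons]
      by_cases hs : e.2 = s
      · subst hs
        simp only [beq_self_eq_true, if_pos, List.map_cons, List.foldl_cons]
        cases hg : d.get? e.2 with
        | none => rw [ih]; simp [PySem.Dict.get?_insert]
        | some m =>
            simp only [hg]
            by_cases hw : m < (pvEdict lte).getD (e.1, e.2) 0
            · rw [if_pos (by exact hw), ih]
              simp [hw, PySem.Dict.get?_insert]
            · rw [if_neg (by exact hw), ih, hg]
              simp [hw]
      · have hb : (e.2 == s) = false := by simp [hs]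
        simp only [hb, Bool.false_eq_true, if_neg, not_false_iff]
        cases hg : d.get? e.2 with
        | none => rw [ih]; simp [PySem.Dict.get?_insert, Ne.symm hs]
        | some m =>
            simp only [hg]
            by_cases hw : m < (pvEdict lte).getD (e.1, e.2) 0
            · rw [if_pos (by exact hw), ih]
              simp [PySem.Dict.get?_insert, Ne.symm hs]
            · rw [if_neg (by exact hw), ih]

-- find? with a beq-equality predicate returns the key itself iff present
theorem pv_find?_beq (l : List Int) (k : Int) :
    l.find? (fun n => n == k) = if k ∈ l then some k else none := by
  induction l with
  | nil => simp
  | cons x t ih =>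
      by_cases hx : x = k
      · subst hx; simp [List.find?_cons]
      · have : (x == k) = false := by simp [hx]
        simp [this, ih, Ne.symm hx]

-- max? over id depends only on membership
theorem pv_max?_congr (l l' : List Int) (hm : ∀ x, x ∈ l ↔ x ∈ l') :
    PySem.List.max? l (fun y => y) = PySem.List.max? l' (fun y => y) := by
  cases l with
  | nil =>
      cases l' with
      | nil => rfl
      | cons y t' => exact absurd ((hm y).2 (by simp)) (by simp)
  | cons x t =>
      cases l' with
      | nil => exact absurd ((hm x).1 (by simp)) (by simp)
      | cons y t' =>
          rw [PySem.List.max?_id_cons, PySem.List.max?_id_cons]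
          have key : ∀ (a : Int) (u : List Int) (b : Int) (v : List Int),
              (∀ x, x ∈ a :: u ↔ x ∈ b :: v) → u.foldl max a ≤ v.foldl max b := by
            intro a u b v h
            have hmem : u.foldl max a ∈ a :: u := by
              rcases PySem.List.foldl_max_mem u a with h1 | h1
              · simp [h1]
              · simp [h1]
            have : u.foldl max a ∈ b :: v := (h _).1 hmem
            rcases List.mem_cons.1 this with h2 | h2
            · rw [h2]; exact (PySem.List.le_foldl_max v b).1
            · exact (PySem.List.le_foldl_max v b).2 _ h2
          exact congrArg some (le_antisymm (key _ _ _ _ hm) (key _ _ _ _ (fun x => (hm x).symm)))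

-- lookup of an addend list: first value at key k, default 0
def pvLk (L : List (Int × Int)) (k : Int) : Int :=
  ((L.find? (fun p => p.1 == k)).map (·.2)).getD 0

theorem pv_lk_cons (p : Int × Int) (L : List (Int × Int)) (k : Int) :
    pvLk (p :: L) k = if p.1 = k then p.2 else pvLk L k := by
  by_cases h : p.1 = k
  · simp [pvLk, List.find?_cons, h]
  · simp [pvLk, List.find?_cons, h, show (p.1 == k) = false by simp [h]]

theorem pv_lk_eq_zero_of_not_mem (L : List (Int × Int)) (k : Int)
    (h : k ∉ L.map (·.1)) : pvLk L k = 0 := by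
  induction L with
  | nil => rfl
  | cons p t ih =>
      rw [pv_lk_cons]
      simp only [List.map_cons, List.mem_cons] at h
      push_neg at h
      rw [if_neg (fun hh => h.1 hh.symm)]
      exact ih h.2

-- folding "add a at key k" over distinct existing keys is a pointwise map on items
theorem pv_foldl_modify_eq_map (L : List (Int × Int)) (d : PySem.Dict Int Int)
    (hd : d.keys.Nodup) (hL : (L.map (·.1)).Nodup) (hin : ∀ p ∈ L, d.contains p.1 = true) :
    (L.foldl (fun d p => d.modify p.1 0 (fun v => v + p.2)) d).items =
      d.items.map (fun q => (q.1, q.2 + pvLk L q.1)) := by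
  induction L generalizing d with
  | nil =>
      simp only [List.foldl_nil]
      simp [pvLk]
  | cons p t ih =>
      simp only [List.foldl_cons]
      have hcp : d.contains p.1 = true := hin p (by simp)
      have hd' : (d.modify p.1 0 (fun v => v + p.2)).keys.Nodup := by
        rw [PySem.Dict.keys_modify, PySem.Dict.keys_insert_of_contains _ _ hcp]
        exact hd
      have hin' : ∀ q ∈ t, (d.modify p.1 0 (fun v => v + p.2)).contains q.1 = true := by
        intro q hq
        rw [PySem.Dict.contains_modify]
        simp [hin q (by simp [hq])]
      rw [ih _ hd' (by simpa using hL.of_cons) hin']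
      show ((d.insert p.1 _).items.map _) = _
      rw [PySem.Dict.items_insert_of_contains _ _ hcp, List.map_map]
      apply List.map_congr_left
      intro q hq
      by_cases hk : q.1 = p.1
      · have hq2 : d.getD p.1 0 = q.2 := by
          have : (p.1, q.2) ∈ d.items := by
            rcases q with ⟨k, v⟩; subst hk; exact hq
          exact PySem.Dict.getD_of_mem_items d this hd 0
        have hnt : p.1 ∉ t.map (·.1) := by
          simp only [List.map_cons] at hL; exact (List.nodup_cons.1 hL).1
        simp only [Function.comp_apply, show (q.1 == p.1) = true by simp [hk]]
        simp only [if_true]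
        rw [pv_lk_cons, if_pos hk.symm, pv_lk_eq_zero_of_not_mem t p.1 hnt]
        simp [hq2, hk]
      · simp only [Function.comp_apply, show (q.1 == p.1) = false by simp [hk]]
        rw [if_neg (by simp), pv_lk_cons, if_neg (fun h => hk h.symm)]

theorem pv_runmax_eq_max? (ws : List Int) :
    ws.foldl (fun acc w => match acc with | none => some w | some m => if m < w then some w else some m) none
      = PySem.List.max? ws (fun y => y) := by
  unfold PySem.List.max?
  congr 1
  funext acc w
  cases acc <;> rfl

theorem pv_wlist (edges : List (Int × Int)) (lte : List (Int × Int × Int)) (s : Int) :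
    (edges.filter (fun e => e.2 == s)).map (fun e => (pvEdict lte).getD (e.1, e.2) 0)
      = pvW edges lte s := by
  unfold pvW pvPredList
  rw [List.map_map]
  apply List.map_congr_left
  intro e he
  have : e.2 = s := by simpa using (List.mem_filter.1 he).2
  simp [this]

theorem pv_maxd_get? (edges : List (Int × Int)) (lte : List (Int × Int × Int)) (s : Int) :
    (pvMaxd edges lte).get? s = pvBest edges lte s := by
  unfold pvMaxd pvBest
  rw [pv_maxd_spec, PySem.Dict.get?_empty, pv_wlist, pv_runmax_eq_max?]

theorem pv_maxd_keys_nodup (edges : List (Int × Int)) (lte : List (Int × Int × Int)) :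
    (pvMaxd edges lte).keys.Nodup := by
  unfold pvMaxd
  have h : ∀ (es : List (Int × Int)) (d : PySem.Dict Int Int), d.keys.Nodup →
      ((es.foldl (fun d e =>
        let w := (pvEdict lte).getD (e.1, e.2) 0
        match d.get? e.2 with
        | some m => if w > m then d.insert e.2 w else d
        | none => d.insert e.2 w) d)).keys.Nodup := by
    intro es
    induction es with
    | nil => exact fun d h => h
    | cons e t ih =>
        intro d h
        simp only [List.foldl_cons]
        apply ih
        cases hg : d.get? e.2 with
        | none => simp only [hg]; exact PySem.Dict.nodup_keys_insert _ _ _ h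
        | some m =>
            simp only [hg]
            split
            · exact PySem.Dict.nodup_keys_insert _ _ _ h
            · exact h
  exact h edges PySem.Dict.empty PySem.Dict.nodup_keys_empty

theorem pv_best_ne_none_iff (edges : List (Int × Int)) (lte : List (Int × Int × Int)) (n : Int) :
    pvBest edges lte n ≠ none ↔ pvPredList edges n ≠ [] := by
  unfold pvBest
  rw [not_iff_not, PySem.List.max?_eq_none_iff]
  unfold pvW
  simp

theorem pv_succ_mem_nodes (edges : List (Int × Int)) (n : Int)
    (h : pvPredList edges n ≠ []) : n ∈ pvNodes edges := by
  unfold pvPredList at h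
  have : edges.filter (fun e => e.2 == n) ≠ [] := fun hh => h (by simp [hh])
  rcases List.exists_mem_of_ne_nil _ this with ⟨e, he⟩
  rcases List.mem_filter.1 he with ⟨hmem, hbeq⟩
  have hn : e.2 = n := by simpa using hbeq
  unfold pvNodes
  rw [PySem.Set.mem_ofList]
  exact List.mem_flatMap.2 ⟨e, hmem, by simp [hn]⟩

theorem pv_ofList_empty_iff (P : List Int) : (PySem.Set.ofList P).length > 0 ↔ P ≠ [] := by
  constructor
  · intro h hP; subst hP; simp at h
  · intro h
    rcases List.exists_mem_of_ne_nil _ h with ⟨x, hx⟩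
    have : x ∈ PySem.Set.ofList P := (PySem.Set.mem_ofList _ _).2 hx
    exact List.length_pos_of_mem this

theorem pv_A_items (edges : List (Int × Int)) (pltn : List (Int × Int)) (lte : List (Int × Int × Int)) :
    cal_lt_of_node edges pltn lte =
      ((pvLA edges lte).foldl (fun d p => d.modify p.1 0 (fun v => v + p.2))
        (PySem.Dict.ofList pltn)).items := by
  unfold cal_lt_of_node pvLA
  dsimp only
  rw [List.foldl_map, List.foldl_filter]
  congr 1
  congr 1
  funext d n
  have hpred : (find_preds_of_node edges).getD n ([] : PySem.Set Int)
      = PySem.Set.ofList (pvPredList edges n) := by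
    unfold find_preds_of_node
    rw [pv_preds_spec, pv_getD_insert_empty _ _ (fun k => by rw [PySem.Dict.getD_empty]),
      PySem.Set.ofList_eq_foldl]
    rfl
  rw [hpred]
  by_cases hP : pvPredList edges n = []
  · have hb : pvBest edges lte n = none := by
      unfold pvBest pvW
      rw [hP]
      simp
    rw [if_neg (by simp [hP]), hb]
    simp
  · have hlen : (PySem.Set.ofList (pvPredList edges n)).length > 0 :=
      (pv_ofList_empty_iff _).2 hP
    rw [if_pos hlen]
    have hmax : PySem.List.max?
        ((PySem.Set.ofList (pvPredList edges n)).map (fun p => (pvEdict lte).getD (p, n) 0))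
        (fun y => y) = pvBest edges lte n := by
      unfold pvBest pvW
      apply pv_max?_congr
      intro x
      simp only [List.mem_map]
      constructor
      · rintro ⟨p, hp, rfl⟩; exact ⟨p, (PySem.Set.mem_ofList _ _).1 hp, rfl⟩
      · rintro ⟨p, hp, rfl⟩; exact ⟨p, (PySem.Set.mem_ofList _ _).2 hp, rfl⟩
    rw [hmax]
    cases hb : pvBest edges lte n with
    | none => exact absurd ((pv_best_ne_none_iff edges lte n).2 hP) (by simp [hb])
    | some m => simp

theorem pv_B_items (edges : List (Int × Int)) (pltn : List (Int × Int)) (lte : List (Int × Int × Int)) :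
    cal_lt_of_node_alt edges pltn lte =
      ((pvMaxd edges lte).items.foldl (fun d p => d.modify p.1 0 (fun v => v + p.2))
        (PySem.Dict.ofList pltn)).items := rfl

theorem pv_keys_ofList (pltn : List (Int × Int)) :
    (PySem.Dict.ofList pltn : PySem.Dict Int Int).keys = PySem.Set.ofList (pltn.map (·.1)) := by
  show (pltn.foldl (fun d p => d.insert p.1 p.2) PySem.Dict.empty).keys = _
  rw [PySem.Dict.keys_foldl_insert_key pltn (fun p => p.1) (fun _ p => p.2) PySem.Dict.empty]
  simp [PySem.Set.update_nil_left, PySem.Dict.keys_empty]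

theorem pv_lk_LA (edges : List (Int × Int)) (lte : List (Int × Int × Int)) (k : Int) :
    pvLk (pvLA edges lte) k = (pvBest edges lte k).getD 0 := by
  unfold pvLA pvLk
  rw [List.find?_map]
  rw [show ((fun p : Int × Int => p.1 == k) ∘ (fun n => (n, (pvBest edges lte n).getD 0)))
      = fun n => n == k from rfl]
  rw [pv_find?_beq]
  by_cases hk : k ∈ (pvNodes edges).filter (fun n => (pvBest edges lte n).isSome)
  · rw [if_pos hk]; simp
  · rw [if_neg hk]
    cases hbest : pvBest edges lte k with
    | none => simp
    | some m =>
        exfalso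
        apply hk
        have hne : pvPredList edges k ≠ [] :=
          (pv_best_ne_none_iff edges lte k).1 (by simp [hbest])
        exact List.mem_filter.2 ⟨pv_succ_mem_nodes _ _ hne, by simp [hbest]⟩

theorem pv_lk_LB (edges : List (Int × Int)) (lte : List (Int × Int × Int)) (k : Int) :
    pvLk (pvMaxd edges lte).items k = (pvBest edges lte k).getD 0 := by
  have h : pvLk (pvMaxd edges lte).items k = ((pvMaxd edges lte).get? k).getD 0 := rfl
  rw [h, pv_maxd_get?]

-- ===== VERDICT (by name: the statement is the Claim_ definition above) =====
theorem cal_lt_of_node_spec : Claim_equal_cal_lt_of_node := by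
  intro edges pltn lte _ hpre
  unfold Spec_cal_lt_of_node Pre_cal_lt_of_node at *
  have hcont : ∀ n : Int, pvPredList edges n ≠ [] →
      (PySem.Dict.ofList pltn : PySem.Dict Int Int).contains n = true := by
    intro n hne
    have : edges.filter (fun e => e.2 == n) ≠ [] := fun hh => hne (by simp [pvPredList, hh])
    rcases List.exists_mem_of_ne_nil _ this with ⟨e, he⟩
    rcases List.mem_filter.1 he with ⟨hmem, hbeq⟩
    have hn : e.2 = n := by simpa using hbeq
    have hall := (List.all_eq_true.1 hpre) e hmem
    simp only [Bool.and_eq_true] at hall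
    rcases List.any_eq_true.1 hall.1 with ⟨q, hq, hq1⟩
    have hq1' : q.1 = n := by
      have : q.1 = e.2 := by simpa using hq1
      omega
    rw [PySem.Dict.contains_iff_mem_keys, pv_keys_ofList, PySem.Set.mem_ofList]
    exact List.mem_map.2 ⟨q, hq, hq1'⟩
  have h0 : (PySem.Dict.ofList pltn : PySem.Dict Int Int).keys.Nodup :=
    PySem.Dict.nodup_keys_ofList pltn
  have hLAfst : (pvLA edges lte).map (·.1)
      = (pvNodes edges).filter (fun n => (pvBest edges lte n).isSome) := by
    unfold pvLA
    rw [List.map_map,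
      show ((·.1) ∘ (fun n : Int => (n, (pvBest edges lte n).getD 0))) = id from rfl,
      List.map_id]
  have hLAnd : ((pvLA edges lte).map (·.1)).Nodup := by
    rw [hLAfst]
    exact List.Nodup.filter _ (PySem.Set.nodup_ofList _)
  have hLAin : ∀ p ∈ pvLA edges lte, (PySem.Dict.ofList pltn : PySem.Dict Int Int).contains p.1 = true := by
    intro p hp
    have h1 : p.1 ∈ (pvLA edges lte).map (·.1) := List.mem_map.2 ⟨p, hp, rfl⟩
    rw [hLAfst] at h1
    rcases List.mem_filter.1 h1 with ⟨_, hsome⟩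
    exact hcont p.1 ((pv_best_ne_none_iff edges lte p.1).1 (by
      intro hh; rw [hh] at hsome; simp at hsome))
  have hLBnd : ((pvMaxd edges lte).items.map (·.1)).Nodup := pv_maxd_keys_nodup edges lte
  have hLBin : ∀ p ∈ (pvMaxd edges lte).items,
      (PySem.Dict.ofList pltn : PySem.Dict Int Int).contains p.1 = true := by
    intro p hp
    have h1 : (pvMaxd edges lte).contains p.1 = true := by
      rw [PySem.Dict.contains_iff_mem_keys]
      exact List.mem_map.2 ⟨p, hp, rfl⟩
    rw [PySem.Dict.contains_eq_isSome_get?, pv_maxd_get?] at h1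
    exact hcont p.1 ((pv_best_ne_none_iff edges lte p.1).1 (by
      intro hh; rw [hh] at h1; simp at h1))
  rw [pv_A_items, pv_B_items,
    pv_foldl_modify_eq_map _ _ h0 hLAnd hLAin,
    pv_foldl_modify_eq_map _ _ h0 hLBnd hLBin]
  apply List.map_congr_left
  intro q _
  rw [pv_lk_LA, pv_lk_LB]
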